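-- pv_equiv track=rewrite | github.com/wenbo5565/Route_Optimization_for_Multiple_Searchers | BSCA_test.py | is_searcher_occ
-- ===== SOURCE A (Python) =====
-- def return_nearby_cell(c, grid_size):
--     """ return nearby cells given a cell and grid_size """
--     stay = c
--     up = (c[0] - 1, c[1]) if (c[0] - 1) >= 1 else None
--     down = (c[0] + 1, c[1]) if (c[0] + 1) <= grid_size else None
--     left = (c[0], c[1] - 1) if (c[1] - 1) >= 1 else None
--     right = (c[0], c[1] + 1) if (c[1] + 1) <= grid_size else None
--     nearby =  [stay, up, down, left, right]
--     return [direction for direction in nearby if direction != None]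
--
-- def is_searcher_occ(C, T, grid_size):
--     searcher_occ = {}
--     for t in T:
--         for c in C:
--             # when t = 1, searcher can only occupy (1, 1), (1, 2) and (2, 1) because searchers are at (1, 1) at time 0
--             if t == 1:
--                 nearby_cell = return_nearby_cell((1, 1), grid_size)
--                 for each in nearby_cell:
--                     searcher_occ[each, 1] = 1
--             # return searcher_occ
--             else:
--                 already_occ = list(searcher_occ.keys())
--                 last_iter_occ = [c_t for c_t in already_occ if c_t[1] == t - 1] # check where the searcher could be at (t - 1)
--                 for c_t in last_iter_occ:
--                     # if c_t[1] == t - 1: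
--                     nearby_cell = return_nearby_cell(c_t[0], grid_size)
--                     for each in nearby_cell:
--                         searcher_occ[each, t] = 1
--     return searcher_occ
-- ===== SOURCE B (Python) =====
-- def _neighbors(c, grid_size):
--     """ candidate cells with per-direction validity flags, kept in A's order """
--     r, q = c
--     cand = [((r, q), True),
--             ((r - 1, q), r > 1),
--             ((r + 1, q), r < grid_size),
--             ((r, q - 1), q > 1),
--             ((r, q + 1), q < grid_size)]
--     return [cell for cell, ok in cand if ok]
--
-- def is_searcher_occ(C, T, grid_size):
--     # Same reachable-cells dict as A, but built in one pass: the redundant loop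
--     # over C collapses to a non-emptiness test, and the frontier at t-1 is read
--     # from a per-time index instead of rescanning all dict keys every iteration.
--     if not C:
--         return {}
--     occ = {}
--     by_time = {}
--     def add(cell, t):
--         if (cell, t) not in occ:
--             occ[cell, t] = 1
--             by_time.setdefault(t, []).append(cell)
--     for t in T:
--         if t == 1:
--             for cell in _neighbors((1, 1), grid_size):
--                 add(cell, 1)
--         else:
--             for cell in by_time.get(t - 1, []):
--                 for nb in _neighbors(cell, grid_size):
--                     add(nb, t)
--     return occ
-- ===== Notes on version B (the rewrite author's own statement) =====
-- stated objective: faster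
-- what changed: B drops A's redundant re-execution of the whole expansion once per element of C (a non-emptiness test suffices) and replaces A's rescan of every dict key to find the time-(t-1) frontier by a per-time index maintained incrementally, expanding each frontier once per time step.
import Mathlib
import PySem

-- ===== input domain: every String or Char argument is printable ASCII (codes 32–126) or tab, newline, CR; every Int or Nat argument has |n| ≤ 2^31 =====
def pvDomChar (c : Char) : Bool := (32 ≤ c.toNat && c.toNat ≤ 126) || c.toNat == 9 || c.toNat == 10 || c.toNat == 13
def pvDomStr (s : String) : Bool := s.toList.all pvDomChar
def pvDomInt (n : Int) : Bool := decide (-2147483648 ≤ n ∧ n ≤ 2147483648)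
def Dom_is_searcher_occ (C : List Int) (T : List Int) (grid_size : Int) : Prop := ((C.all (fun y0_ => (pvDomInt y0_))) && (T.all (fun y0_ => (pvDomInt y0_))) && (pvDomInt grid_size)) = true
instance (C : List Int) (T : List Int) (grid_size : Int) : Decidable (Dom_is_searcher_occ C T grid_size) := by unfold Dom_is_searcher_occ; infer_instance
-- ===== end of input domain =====

-- B builds the same reachable-cells dict in one pass (C-loop collapsed to a non-emptiness
-- test, frontier read from a per-time index instead of rescanning all keys); equal output.

-- ===== PORT A =====
def nearbyA (c : Int × Int) (grid_size : Int) : List (Int × Int) :=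
  let stay : Option (Int × Int) := some c
  let up : Option (Int × Int) := if c.1 - 1 ≥ 1 then some (c.1 - 1, c.2) else none
  let down : Option (Int × Int) := if c.1 + 1 ≤ grid_size then some (c.1 + 1, c.2) else none
  let left : Option (Int × Int) := if c.2 - 1 ≥ 1 then some (c.1, c.2 - 1) else none
  let right : Option (Int × Int) := if c.2 + 1 ≤ grid_size then some (c.1, c.2 + 1) else none
  -- "[direction for direction in nearby if direction != None]": keep the non-None values
  ([stay, up, down, left, right]).filterMap id

def is_searcher_occ (C : List Int) (T : List Int) (grid_size : Int) : List ((Int × Int) × Int × Int) :=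
  let d : PySem.Dict ((Int × Int) × Int) Int :=
    T.foldl (fun d t =>
      C.foldl (fun d _c =>
        if t = 1 then
          (nearbyA (1, 1) grid_size).foldl (fun d each => d.insert (each, (1 : Int)) 1) d
        else
          let already_occ := d.keys
          let last_iter_occ := already_occ.filter (fun ct => ct.2 == t - 1)
          last_iter_occ.foldl (fun d ct =>
            (nearbyA ct.1 grid_size).foldl (fun d each => d.insert (each, t) 1) d) d) d)
      PySem.Dict.empty
  d.items.map (fun p => (p.1.1, p.1.2, p.2))

-- ===== PORT B =====
def nearbyB (c : Int × Int) (grid_size : Int) : List (Int × Int) :=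
  let cand : List ((Int × Int) × Bool) :=
    [((c.1, c.2), true),
     ((c.1 - 1, c.2), decide (1 < c.1)),
     ((c.1 + 1, c.2), decide (c.1 < grid_size)),
     ((c.1, c.2 - 1), decide (1 < c.2)),
     ((c.1, c.2 + 1), decide (c.2 < grid_size))]
  cand.filterMap (fun pc => if pc.2 then some pc.1 else none)

def addB (s : PySem.Dict ((Int × Int) × Int) Int × PySem.Dict Int (List (Int × Int)))
    (cell : Int × Int) (t : Int) :
    PySem.Dict ((Int × Int) × Int) Int × PySem.Dict Int (List (Int × Int)) :=
  if s.1.contains (cell, t) then s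
  else (s.1.insert (cell, t) 1, s.2.modify t [] (fun l => l ++ [cell]))

def is_searcher_occ_alt (C : List Int) (T : List Int) (grid_size : Int) : List ((Int × Int) × Int × Int) :=
  if C.isEmpty then [] else
  let s : PySem.Dict ((Int × Int) × Int) Int × PySem.Dict Int (List (Int × Int)) :=
    T.foldl (fun s t =>
      if t = 1 then
        (nearbyB (1, 1) grid_size).foldl (fun s cell => addB s cell 1) s
      else
        (s.2.getD (t - 1) []).foldl (fun s cell =>
          (nearbyB cell grid_size).foldl (fun s nb => addB s nb t) s) s)
      (PySem.Dict.empty, PySem.Dict.empty)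
  s.1.items.map (fun p => (p.1.1, p.1.2, p.2))

-- ===== PRECONDITION & SPEC =====
def Spec_is_searcher_occ (C : List Int) (T : List Int) (grid_size : Int) (out : List ((Int × Int) × Int × Int)) : Prop := out = is_searcher_occ_alt C T grid_size
instance (C : List Int) (T : List Int) (grid_size : Int) (out : List ((Int × Int) × Int × Int)) : Decidable (Spec_is_searcher_occ C T grid_size out) := by unfold Spec_is_searcher_occ; infer_instance

-- ===== CLAIM (what is proved, stated in full; the proofs are below) =====
def Claim_equal_is_searcher_occ : Prop := ∀ (C : List Int) (T : List Int) (grid_size : Int), Dom_is_searcher_occ C T grid_size → Spec_is_searcher_occ C T grid_size (is_searcher_occ C T grid_size)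

-- ===== LEMMAS AND PROOFS =====

-- dict invariant maintained by both programs: every stored value is 1, keys nodup
def InvD (d : PySem.Dict ((Int × Int) × Int) Int) : Prop :=
  (∀ p ∈ d.items, p.2 = 1) ∧ d.keys.Nodup

-- frontier keys at time τ, as A computes them
def fr (d : PySem.Dict ((Int × Int) × Int) Int) (τ : Int) : List ((Int × Int) × Int) :=
  d.keys.filter (fun ct => ct.2 == τ)

-- joint invariant relating B's per-time index to A's key rescan
def InvB (d : PySem.Dict ((Int × Int) × Int) Int) (bt : PySem.Dict Int (List (Int × Int))) : Prop :=
  InvD d ∧ ∀ τ : Int, bt.getD τ [] = (fr d τ).map (·.1)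

-- the fold of inserts at a fixed time over a list of cells (A's innermost loop)
def insfold (t : Int) (L : List (Int × Int)) (d : PySem.Dict ((Int × Int) × Int) Int) :
    PySem.Dict ((Int × Int) × Int) Int :=
  L.foldl (fun d each => d.insert (each, t) 1) d

-- A's frontier-expansion loop at time t over a list of frontier keys
def expfold (t grid_size : Int) (ls : List ((Int × Int) × Int))
    (d : PySem.Dict ((Int × Int) × Int) Int) : PySem.Dict ((Int × Int) × Int) Int :=
  ls.foldl (fun d ct => insfold t (nearbyA ct.1 grid_size) d) d

-- A's loop body for one (t, c) iteration
def stepA (t grid_size : Int) (d : PySem.Dict ((Int × Int) × Int) Int) :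
    PySem.Dict ((Int × Int) × Int) Int :=
  if t = 1 then insfold 1 (nearbyA (1, 1) grid_size) d
  else expfold t grid_size (fr d (t - 1)) d

-- B's loop body for one time step
def stepB (t grid_size : Int)
    (s : PySem.Dict ((Int × Int) × Int) Int × PySem.Dict Int (List (Int × Int))) :
    PySem.Dict ((Int × Int) × Int) Int × PySem.Dict Int (List (Int × Int)) :=
  if t = 1 then
    (nearbyB (1, 1) grid_size).foldl (fun s cell => addB s cell 1) s
  else
    (s.2.getD (t - 1) []).foldl (fun s cell =>
      (nearbyB cell grid_size).foldl (fun s nb => addB s nb t) s) s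

theorem nearby_eq (c : Int × Int) (g : Int) : nearbyB c g = nearbyA c g := by
  simp only [nearbyA, nearbyB, List.filterMap, id]
  by_cases h1 : 1 ≤ c.1 - 1 <;> by_cases h2 : c.1 + 1 ≤ g <;>
    by_cases h3 : 1 ≤ c.2 - 1 <;> by_cases h4 : c.2 + 1 ≤ g <;>
    simp [h1, h2, h3, h4, show (1 < c.1) ↔ 1 ≤ c.1 - 1 from by omega,
      show (c.1 < g) ↔ c.1 + 1 ≤ g from by omega,
      show (1 < c.2) ↔ 1 ≤ c.2 - 1 from by omega,
      show (c.2 < g) ↔ c.2 + 1 ≤ g from by omega]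

theorem insert_noop (d : PySem.Dict ((Int × Int) × Int) Int) (k : (Int × Int) × Int)
    (h1 : ∀ p ∈ d.items, p.2 = 1) (h2 : d.contains k = true) : d.insert k 1 = d := by
  apply PySem.Dict.ext
  rw [PySem.Dict.items_insert_of_contains d 1 h2]
  conv_rhs => rw [← List.map_id d.items]
  apply List.map_congr_left
  intro p hp
  by_cases hk : p.1 = k
  · have hv : p.2 = 1 := h1 p hp
    have hif : (if (p.1 == k) = true then (k, (1 : Int)) else p) = (k, 1) := by simp [hk]
    rw [hif, ← hk, ← hv]
    rfl
  · simp [hk]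

theorem invD_insert (d : PySem.Dict ((Int × Int) × Int) Int) (k : (Int × Int) × Int)
    (h : InvD d) : InvD (d.insert k 1) := by
  refine ⟨fun p hp => ?_, PySem.Dict.nodup_keys_insert d k 1 h.2⟩
  rcases (PySem.Dict.mem_items_insert d k 1 p).1 hp with h1 | h1
  · simp [h1]
  · exact h.1 p h1.1

theorem contains_insert_mono (d : PySem.Dict ((Int × Int) × Int) Int)
    (k k' : (Int × Int) × Int) (v : Int) (h : d.contains k = true) :
    (d.insert k' v).contains k = true := by
  rw [PySem.Dict.contains_insert]
  simp [h]

theorem insfold_invD (t : Int) (L : List (Int × Int)) (d : PySem.Dict ((Int × Int) × Int) Int)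
    (h : InvD d) : InvD (insfold t L d) := by
  induction L generalizing d with
  | nil => exact h
  | cons e L ih => exact ih _ (invD_insert d (e, t) h)

theorem insfold_contains_mono (t : Int) (L : List (Int × Int))
    (d : PySem.Dict ((Int × Int) × Int) Int) (k : (Int × Int) × Int)
    (h : d.contains k = true) : (insfold t L d).contains k = true := by
  induction L generalizing d with
  | nil => exact h
  | cons e L ih => exact ih _ (contains_insert_mono d k (e, t) 1 h)

theorem insfold_contains_self (t : Int) (L : List (Int × Int))
    (d : PySem.Dict ((Int × Int) × Int) Int) :
    ∀ e ∈ L, (insfold t L d).contains (e, t) = true := by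
  induction L generalizing d with
  | nil => intro e he; cases he
  | cons a L ih =>
    intro e he
    rcases List.mem_cons.mp he with rfl | he'
    · exact insfold_contains_mono t L _ _ (PySem.Dict.contains_insert_self d (e, t) 1)
    · exact ih _ e he'

theorem insfold_noop (t : Int) (L : List (Int × Int)) (d : PySem.Dict ((Int × Int) × Int) Int)
    (h : InvD d) (hall : ∀ e ∈ L, d.contains (e, t) = true) : insfold t L d = d := by
  induction L with
  | nil => rfl
  | cons a L ih =>
    have h0 : d.insert (a, t) 1 = d := insert_noop d (a, t) h.1 (hall a (by simp))
    show insfold t L (d.insert (a, t) 1) = d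
    rw [h0]
    exact ih (fun e he => hall e (by simp [he]))

theorem fr_insert_ne (d : PySem.Dict ((Int × Int) × Int) Int) (e : Int × Int) (t τ : Int)
    (h : InvD d) (hne : τ ≠ t) : fr (d.insert (e, t) 1) τ = fr d τ := by
  by_cases hc : d.contains (e, t) = true
  · rw [insert_noop d (e, t) h.1 hc]
  · unfold fr
    rw [PySem.Dict.keys_insert_of_not_contains d 1 (by simpa using hc)]
    rw [List.filter_append]
    simp [Ne.symm hne]

theorem insfold_fr_ne (t τ : Int) (L : List (Int × Int))
    (d : PySem.Dict ((Int × Int) × Int) Int) (h : InvD d) (hne : τ ≠ t) :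
    fr (insfold t L d) τ = fr d τ := by
  induction L generalizing d with
  | nil => rfl
  | cons a L ih =>
    show fr (insfold t L (d.insert (a, t) 1)) τ = fr d τ
    rw [ih _ (invD_insert d (a, t) h), fr_insert_ne d a t τ h hne]

theorem expfold_invD (t g : Int) (ls : List ((Int × Int) × Int))
    (d : PySem.Dict ((Int × Int) × Int) Int) (h : InvD d) : InvD (expfold t g ls d) := by
  induction ls generalizing d with
  | nil => exact h
  | cons ct ls ih => exact ih _ (insfold_invD t _ d h)

theorem expfold_contains_mono (t g : Int) (ls : List ((Int × Int) × Int))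
    (d : PySem.Dict ((Int × Int) × Int) Int) (k : (Int × Int) × Int)
    (h : d.contains k = true) : (expfold t g ls d).contains k = true := by
  induction ls generalizing d with
  | nil => exact h
  | cons ct ls ih => exact ih _ (insfold_contains_mono t _ d k h)

theorem expfold_all (t g : Int) (ls : List ((Int × Int) × Int))
    (d : PySem.Dict ((Int × Int) × Int) Int) :
    ∀ ct ∈ ls, ∀ e ∈ nearbyA ct.1 g, (expfold t g ls d).contains (e, t) = true := by
  induction ls generalizing d with
  | nil => intro ct hct; cases hct
  | cons a ls ih =>
    intro ct hct e he
    rcases List.mem_cons.mp hct with rfl | hct'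
    · exact expfold_contains_mono t g ls _ _ (insfold_contains_self t _ d e he)
    · exact ih _ ct hct' e he

theorem expfold_noop (t g : Int) (ls : List ((Int × Int) × Int))
    (d : PySem.Dict ((Int × Int) × Int) Int) (h : InvD d)
    (hall : ∀ ct ∈ ls, ∀ e ∈ nearbyA ct.1 g, d.contains (e, t) = true) :
    expfold t g ls d = d := by
  induction ls with
  | nil => rfl
  | cons a ls ih =>
    have h0 : insfold t (nearbyA a.1 g) d = d := insfold_noop t _ d h (hall a (by simp))
    show expfold t g ls (insfold t (nearbyA a.1 g) d) = d
    rw [h0]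
    exact ih (fun ct hct => hall ct (by simp [hct]))

theorem expfold_fr_ne (t τ g : Int) (ls : List ((Int × Int) × Int))
    (d : PySem.Dict ((Int × Int) × Int) Int) (h : InvD d) (hne : τ ≠ t) :
    fr (expfold t g ls d) τ = fr d τ := by
  induction ls generalizing d with
  | nil => rfl
  | cons a ls ih =>
    show fr (expfold t g ls (insfold t (nearbyA a.1 g) d)) τ = fr d τ
    rw [ih _ (insfold_invD t _ d h), insfold_fr_ne t τ _ d h hne]

theorem stepA_idem (t g : Int) (d : PySem.Dict ((Int × Int) × Int) Int) (h : InvD d) :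
    stepA t g (stepA t g d) = stepA t g d := by
  unfold stepA
  split
  · exact insfold_noop 1 _ _ (insfold_invD 1 _ d h)
      (fun e he => insfold_contains_self 1 _ d e he)
  · rename_i ht
    have hne : (t - 1) ≠ t := by omega
    rw [expfold_fr_ne t (t - 1) g _ d h hne]
    exact expfold_noop t g _ _ (expfold_invD t g _ d h)
      (fun ct hct e he => expfold_all t g _ d ct hct e he)

theorem iter_idem (t g : Int) (C : List Int) (d : PySem.Dict ((Int × Int) × Int) Int)
    (h : InvD d) : C.foldl (fun d _ => stepA t g d) (stepA t g d) = stepA t g d := by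
  induction C with
  | nil => rfl
  | cons c C ih =>
    show C.foldl (fun d _ => stepA t g d) (stepA t g (stepA t g d)) = stepA t g d
    rw [stepA_idem t g d h]
    exact ih

theorem add_sim (d : PySem.Dict ((Int × Int) × Int) Int)
    (bt : PySem.Dict Int (List (Int × Int))) (cell : Int × Int) (t : Int) (h : InvB d bt) :
    (addB (d, bt) cell t).1 = d.insert (cell, t) 1 ∧
      InvB (addB (d, bt) cell t).1 (addB (d, bt) cell t).2 := by
  by_cases hc : d.contains (cell, t) = true
  · have he : addB (d, bt) cell t = (d, bt) := by unfold addB; simp [hc]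
    rw [he]
    exact ⟨(insert_noop d (cell, t) h.1.1 hc).symm, h⟩
  · have hc' : d.contains (cell, t) = false := by simpa using hc
    have he : addB (d, bt) cell t =
        (d.insert (cell, t) 1, bt.modify t [] (fun l => l ++ [cell])) := by
      unfold addB; simp [hc']
    rw [he]
    refine ⟨rfl, invD_insert d (cell, t) h.1, fun τ => ?_⟩
    have hfr : fr (d.insert (cell, t) 1) τ = fr d τ ++ if t = τ then [(cell, t)] else [] := by
      unfold fr
      rw [PySem.Dict.keys_insert_of_not_contains d 1 hc', List.filter_append]
      by_cases hτ : t = τ <;> simp [hτ]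
    rw [PySem.Dict.getD_modify, hfr]
    by_cases hτ : τ = t
    · simp [hτ, h.2 t]
    · simp [hτ, Ne.symm hτ, h.2 τ]

theorem addfold_sim (t : Int) (cells : List (Int × Int))
    (d : PySem.Dict ((Int × Int) × Int) Int) (bt : PySem.Dict Int (List (Int × Int)))
    (h : InvB d bt) :
    (cells.foldl (fun s cell => addB s cell t) (d, bt)).1 = insfold t cells d ∧
      InvB (cells.foldl (fun s cell => addB s cell t) (d, bt)).1
        (cells.foldl (fun s cell => addB s cell t) (d, bt)).2 := by
  induction cells generalizing d bt with
  | nil => exact ⟨rfl, h⟩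
  | cons a cells ih =>
    obtain ⟨h1, h2⟩ := add_sim d bt a t h
    show (cells.foldl (fun s cell => addB s cell t) (addB (d, bt) a t)).1 = _ ∧ _
    have heta : addB (d, bt) a t = ((addB (d, bt) a t).1, (addB (d, bt) a t).2) := rfl
    rw [heta]
    obtain ⟨ih1, ih2⟩ := ih _ _ h2
    refine ⟨?_, ih2⟩
    rw [ih1, h1]
    rfl

theorem cellsfold_sim (t g : Int) (cells : List (Int × Int))
    (d : PySem.Dict ((Int × Int) × Int) Int) (bt : PySem.Dict Int (List (Int × Int)))
    (h : InvB d bt) :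
    (cells.foldl (fun s cell => (nearbyB cell g).foldl (fun s nb => addB s nb t) s) (d, bt)).1 =
      cells.foldl (fun d cell => insfold t (nearbyA cell g) d) d ∧
      InvB (cells.foldl (fun s cell => (nearbyB cell g).foldl (fun s nb => addB s nb t) s) (d, bt)).1
        (cells.foldl (fun s cell => (nearbyB cell g).foldl (fun s nb => addB s nb t) s) (d, bt)).2 := by
  induction cells generalizing d bt with
  | nil => exact ⟨rfl, h⟩
  | cons a cells ih =>
    rw [show ∀ (l : List (Int × Int)) (s0), List.foldl (fun s cell => (nearbyB cell g).foldl (fun s nb => addB s nb t) s) s0 (a :: l) = List.foldl (fun s cell => (nearbyB cell g).foldl (fun s nb => addB s nb t) s) ((nearbyB a g).foldl (fun s nb => addB s nb t) s0) l from fun _ _ => rfl]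
    rw [nearby_eq a g]
    obtain ⟨h1, h2⟩ := addfold_sim t (nearbyA a g) d bt h
    have heta : (nearbyA a g).foldl (fun s nb => addB s nb t) (d, bt) =
        (((nearbyA a g).foldl (fun s nb => addB s nb t) (d, bt)).1,
         ((nearbyA a g).foldl (fun s nb => addB s nb t) (d, bt)).2) := rfl
    rw [heta, h1]
    obtain ⟨ih1, ih2⟩ := ih _ _ (h1 ▸ h2)
    exact ⟨ih1, ih2⟩

theorem stepB_sim (t g : Int) (d : PySem.Dict ((Int × Int) × Int) Int)
    (bt : PySem.Dict Int (List (Int × Int))) (h : InvB d bt) :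
    (stepB t g (d, bt)).1 = stepA t g d ∧
      InvB (stepB t g (d, bt)).1 (stepB t g (d, bt)).2 := by
  unfold stepB stepA
  by_cases ht : t = 1
  · simp only [ht, if_true]
    rw [nearby_eq (1, 1) g]
    exact addfold_sim 1 (nearbyA (1, 1) g) d bt h
  · simp only [ht, if_false]
    have hcells : bt.getD (t - 1) [] = (fr d (t - 1)).map (·.1) := h.2 (t - 1)
    rw [hcells]
    obtain ⟨h1, h2⟩ := cellsfold_sim t g ((fr d (t - 1)).map (·.1)) d bt h
    refine ⟨?_, h2⟩
    rw [h1]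
    unfold expfold
    rw [List.foldl_map]

theorem main_fold (g : Int) (c0 : Int) (Cr : List Int) (T : List Int)
    (d : PySem.Dict ((Int × Int) × Int) Int) (bt : PySem.Dict Int (List (Int × Int)))
    (h : InvB d bt) :
    (T.foldl (fun s t => stepB t g s) (d, bt)).1 =
      T.foldl (fun d t => (c0 :: Cr).foldl (fun d _ => stepA t g d) d) d ∧
      InvB (T.foldl (fun s t => stepB t g s) (d, bt)).1
        (T.foldl (fun s t => stepB t g s) (d, bt)).2 := by
  induction T generalizing d bt with
  | nil => exact ⟨rfl, h⟩
  | cons t T ih =>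
    obtain ⟨h1, h2⟩ := stepB_sim t g d bt h
    have hA : (c0 :: Cr).foldl (fun d _ => stepA t g d) d = stepA t g d := by
      show Cr.foldl (fun d _ => stepA t g d) (stepA t g d) = stepA t g d
      exact iter_idem t g Cr d h.1
    show (T.foldl (fun s t => stepB t g s) (stepB t g (d, bt))).1 =
        T.foldl (fun d t => (c0 :: Cr).foldl (fun d _ => stepA t g d) d)
          ((c0 :: Cr).foldl (fun d _ => stepA t g d) d) ∧
      InvB (T.foldl (fun s t => stepB t g s) (stepB t g (d, bt))).1
        (T.foldl (fun s t => stepB t g s) (stepB t g (d, bt))).2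
    rw [hA]
    have heta : stepB t g (d, bt) = ((stepB t g (d, bt)).1, (stepB t g (d, bt)).2) := rfl
    rw [heta, h1]
    exact ih _ _ (h1 ▸ h2)

theorem invB_empty : InvB PySem.Dict.empty PySem.Dict.empty := by
  refine ⟨⟨fun p hp => ?_, ?_⟩, fun τ => ?_⟩
  · cases hp
  · show List.Nodup []
    exact List.nodup_nil
  · rw [PySem.Dict.getD_empty]
    unfold fr
    rw [PySem.Dict.keys_empty]
    rfl

theorem foldl_const_id (T : List Int) (d : PySem.Dict ((Int × Int) × Int) Int) :
    T.foldl (fun d (_ : Int) => d) d = d := by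
  induction T with
  | nil => rfl
  | cons t T ih => exact ih

-- ===== VERDICT (by name: the statement is the Claim_ definition above) =====
theorem is_searcher_occ_spec : Claim_equal_is_searcher_occ := by
  intro C T g _
  show is_searcher_occ C T g = is_searcher_occ_alt C T g
  cases C with
  | nil =>
    show (T.foldl (fun d (_ : Int) => d) PySem.Dict.empty).items.map _ = _
    rw [foldl_const_id]
    rfl
  | cons c0 Cr =>
    have hmain := main_fold g c0 Cr T PySem.Dict.empty PySem.Dict.empty invB_empty
    show (T.foldl (fun d t => (c0 :: Cr).foldl (fun d _c => stepA t g d) d) PySem.Dict.empty).items.map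
        (fun p => (p.1.1, p.1.2, p.2)) = _
    rw [← hmain.1]
    rfl
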